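-- pv_equiv track=rewrite | github.com/adambossy/panoply | packages/financial_analysis/categorize.py | _group_by_normalized_merchant
-- ===== SOURCE A (Python) =====
-- import unicodedata
-- from collections.abc import Iterable, Mapping, Sequence
-- from typing import Any, NamedTuple, cast
--
-- def _normalize_merchant_key(tx: Mapping[str, Any]) -> str | None:
--     """Return a normalized grouping key from ``merchant`` or ``description``.
--
--     - Normalizes to NFKC, collapses internal whitespace, strips, and casefolds.
--     - Returns ``None`` when no usable value is present (treated as singleton).
--     """
--
--     raw = tx.get("merchant") or tx.get("description")
--     if raw is None:
--         return None
--     s = unicodedata.normalize("NFKC", str(raw)).strip()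
--     if not s:
--         return None
--     return " ".join(s.split()).casefold()
--
-- def _group_by_normalized_merchant(
--     original_seq: list[Mapping[str, Any]],
-- ) -> tuple[list[int], dict[str, list[int]], list[int]]:
--     """Group transactions by normalized merchant/description and pick exemplars.
--
--     Returns a tuple ``(exemplars, by_key, singleton_indices)`` where:
--     - ``exemplars`` is a sorted list of absolute indices (smallest index per group
--       plus singletons).
--     - ``by_key`` maps a normalized key to the absolute indices in that group.
--     - ``singleton_indices`` are items with no usable key (treated as their own group).
--     """
--
--     by_key: dict[str, list[int]] = {}
--     singleton_indices: list[int] = []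
--     for i, tx in enumerate(original_seq):
--         k = _normalize_merchant_key(tx)
--         if k is None:
--             singleton_indices.append(i)
--         else:
--             by_key.setdefault(k, []).append(i)
--
--     exemplars: list[int] = []
--     for idxs in by_key.values():
--         exemplars.append(min(idxs))
--     exemplars.extend(singleton_indices)  # singletons act as their own group
--     exemplars.sort()
--
--     return exemplars, by_key, singleton_indices
-- ===== SOURCE B (Python) =====
-- import unicodedata
--
--
-- def _normalize_merchant_key(tx):
--     raw = tx.get("merchant") or tx.get("description")
--     if raw is None:
--         return None
--     s = unicodedata.normalize("NFKC", str(raw)).strip()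
--     if not s:
--         return None
--     return " ".join(s.split()).casefold()
--
--
-- def _group_by_normalized_merchant(original_seq):
--     # Staged declarative version: compute all keys once, then derive each of the
--     # three results as its own comprehension over the key list.  An index is an
--     # exemplar iff its key is None or does not occur earlier, so exemplars come
--     # out in increasing order with no min() pass and no sort().
--     keys = [_normalize_merchant_key(tx) for tx in original_seq]
--     exemplars = [i for i, k in enumerate(keys) if k is None or k not in keys[:i]]
--     by_key = {k: [j for j, k2 in enumerate(keys) if k2 == k]
--               for i, k in enumerate(keys) if k is not None and k not in keys[:i]}
--     singleton_indices = [i for i, k in enumerate(keys) if k is None]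
--     return exemplars, by_key, singleton_indices
-- ===== Notes on version B (the rewrite author's own statement) =====
-- stated objective: simpler
-- what changed: B computes the key list once and then derives each of the three results as its own declarative comprehension over that list (an index is an exemplar iff its key is None or unseen earlier; a dict comprehension over first occurrences groups indices), replacing A's stateful setdefault loop plus the separate min()-per-group pass and the final sort.
import Mathlib
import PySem

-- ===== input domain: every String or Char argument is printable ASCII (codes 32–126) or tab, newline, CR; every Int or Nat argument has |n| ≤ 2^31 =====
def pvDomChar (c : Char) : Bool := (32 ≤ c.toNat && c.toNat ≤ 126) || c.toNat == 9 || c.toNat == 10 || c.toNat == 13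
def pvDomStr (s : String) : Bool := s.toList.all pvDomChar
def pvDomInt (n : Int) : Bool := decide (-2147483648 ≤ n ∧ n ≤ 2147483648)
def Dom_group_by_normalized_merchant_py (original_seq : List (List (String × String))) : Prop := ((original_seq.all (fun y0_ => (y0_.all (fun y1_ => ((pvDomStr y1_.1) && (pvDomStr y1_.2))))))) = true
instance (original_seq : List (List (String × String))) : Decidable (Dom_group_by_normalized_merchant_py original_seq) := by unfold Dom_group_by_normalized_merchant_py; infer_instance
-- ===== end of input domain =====

-- B replaces A's stateful setdefault loop + min()-per-group pass + sort by staged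
-- comprehensions over a precomputed key list; objective: simpler (not faster).


-- ===== PORT A =====
-- tx.get(key): a Mapping is an association list, lookup = first match
def pvLookup (tx : List (String × String)) (k : String) : Option String :=
  (tx.find? (fun p => p.1 == k)).map (·.2)

-- _normalize_merchant_key; NFKC is the identity and casefold = lower on the
-- printable-ASCII domain (exact there)
def pvNormKey (tx : List (String × String)) : Option String :=
  let raw : Option String :=
    match pvLookup tx "merchant" with
    | some m => if m == "" then pvLookup tx "description" else some m  -- Python `or`: "" is falsy
    | none => pvLookup tx "description"
  match raw with
  | none => none
  | some r =>
    let s := PySem.Str.strip r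
    if s == "" then none
    else some (PySem.Str.lower (PySem.Str.join " " (PySem.Str.split₀ s)))

-- the 'for i, tx in enumerate(original_seq)' loop of A
def pvLoopA : List (List (String × String)) → Int → PySem.Dict String (List Int) → List Int →
    PySem.Dict String (List Int) × List Int
  | [], _, d, s => (d, s)
  | tx :: rest, i, d, s =>
    match pvNormKey tx with
    | none => pvLoopA rest (i + 1) d (s ++ [i])
    | some k => pvLoopA rest (i + 1) (d.modify k [] (fun l => l ++ [i])) s  -- setdefault(k, []).append(i)

def group_by_normalized_merchant_py (original_seq : List (List (String × String))) : List Int × (List (String × List Int)) × List Int :=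
  let st := pvLoopA original_seq 0 PySem.Dict.empty []
  -- min(idxs): the lists are never empty, .getD 0 is unreachable
  let exemplars := st.1.values.foldl (fun acc idxs => acc ++ [(PySem.List.min? idxs (fun x => x)).getD 0]) []
  let exemplars := exemplars ++ st.2
  (PySem.List.sorted exemplars (fun x => x) false, st.1.items, st.2)

-- ===== PORT B =====
-- B's comprehensions, one helper per comprehension of Source B.
-- [i for i, k in enumerate(keys) if k is None or k not in keys[:i]]
def pvExemplarsB (K : List (Option String)) : List Int :=
  (PySem.List.enumerate K 0).filterMap
    (fun p => if p.2 = none ∨ p.2 ∉ PySem.List.slice K none (some p.1) then some p.1 else none)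

-- [j for j, k2 in enumerate(keys) if k2 == k]
def pvIndicesOfB (K : List (Option String)) (k : String) : List Int :=
  (PySem.List.enumerate K 0).filterMap (fun q => if q.2 = some k then some q.1 else none)

-- the dict comprehension; its guard keeps only the FIRST occurrence of each key,
-- so the keys are distinct and this assoc list IS the dict's items in insertion order
def pvByKeyB (K : List (Option String)) : List (String × List Int) :=
  (PySem.List.enumerate K 0).filterMap
    (fun p => match p.2 with
      | none => none
      | some k => if some k ∈ PySem.List.slice K none (some p.1) then none
                  else some (k, pvIndicesOfB K k))

-- [i for i, k in enumerate(keys) if k is None]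
def pvSinglesB (K : List (Option String)) : List Int :=
  (PySem.List.enumerate K 0).filterMap (fun p => if p.2 = none then some p.1 else none)

def group_by_normalized_merchant_py_alt (original_seq : List (List (String × String))) : List Int × (List (String × List Int)) × List Int :=
  let keys := original_seq.map pvNormKey
  (pvExemplarsB keys, pvByKeyB keys, pvSinglesB keys)

-- ===== PRECONDITION & SPEC =====
def Spec_group_by_normalized_merchant_py (original_seq : List (List (String × String))) (out : List Int × (List (String × List Int)) × List Int) : Prop := out = group_by_normalized_merchant_py_alt original_seq
instance (original_seq : List (List (String × String))) (out : List Int × (List (String × List Int)) × List Int) : Decidable (Spec_group_by_normalized_merchant_py original_seq out) := by unfold Spec_group_by_normalized_merchant_py; infer_instance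

-- ===== CLAIM (what is proved, stated in full; the proofs are below) =====
def Claim_equal_group_by_normalized_merchant_py : Prop := ∀ (original_seq : List (List (String × String))), Dom_group_by_normalized_merchant_py original_seq → Spec_group_by_normalized_merchant_py original_seq (group_by_normalized_merchant_py original_seq)

-- ===== LEMMAS AND PROOFS =====

-- the min of each entry's index list, in dict order (what A's second loop collects)
def pvMinsOf (items : List (String × List Int)) : List Int :=
  items.map (fun p => (PySem.List.min? p.2 (fun x => x)).getD 0)

-- the keys in first-occurrence order (proof-side view of the dict comprehension's guard)
def pvFirstKeys (K : List (Option String)) : List String :=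
  (PySem.List.enumerate K 0).filterMap
    (fun p => match p.2 with
      | none => none
      | some k => if some k ∈ PySem.List.slice K none (some p.1) then none else some k)

lemma pvFoldlAppendMap (f : List Int → Int) :
    ∀ (l : List (List Int)) (acc : List Int),
      l.foldl (fun a x => a ++ [f x]) acc = acc ++ l.map f := by
  intro l
  induction l with
  | nil => intro acc; simp
  | cons x t ih => intro acc; simp [List.foldl, ih]

lemma pvMinAppendBig (l : List Int) (i : Int) (hne : l ≠ []) (hb : ∀ x ∈ l, x < i) :
    (PySem.List.min? (l ++ [i]) (fun x => x)).getD 0 = (PySem.List.min? l (fun x => x)).getD 0 := by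
  cases l with
  | nil => exact absurd rfl hne
  | cons x t =>
    have hm : PySem.List.min? (x :: t) (fun x => x) = some (t.foldl min x) :=
      PySem.List.min?_id_cons x t
    have hmem : t.foldl min x ∈ x :: t := PySem.List.min?_mem hm
    have hlt : t.foldl min x < i := hb _ hmem
    have h2 : PySem.List.min? ((x :: t) ++ [i]) (fun x => x) = some ((t ++ [i]).foldl min x) :=
      PySem.List.min?_id_cons x (t ++ [i])
    rw [hm, h2]
    simp [List.foldl_append, min_eq_left (le_of_lt hlt)]

-- enumerate of a one-element extension
lemma pvEnumAppend (K : List (Option String)) (k : Option String) :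
    PySem.List.enumerate (K ++ [k]) 0 = PySem.List.enumerate K 0 ++ [((K.length : Int), k)] := by
  rw [PySem.List.enumerate_append]
  simp [PySem.List.enumerate_cons, PySem.List.enumerate_nil]

-- old slices are unchanged by appending an element at the end
lemma pvSliceExtend (K : List (Option String)) (k : Option String) (p : Int × Option String)
    (hp : p ∈ PySem.List.enumerate K 0) :
    PySem.List.slice (K ++ [k]) none (some p.1) = PySem.List.slice K none (some p.1) := by
  rcases (PySem.List.mem_enumerate_iff _ _ _).mp hp with ⟨j, hj, hpe⟩
  have hp1 : p.1 = (j : Int) := by rw [hpe]; simp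
  rw [hp1, PySem.List.slice_to_natCast, PySem.List.slice_to_natCast,
    List.take_append_of_le_length (le_of_lt hj)]

lemma pvSliceFull (K : List (Option String)) (k : Option String) :
    PySem.List.slice (K ++ [k]) none (some (K.length : Int)) = K := by
  rw [PySem.List.slice_to_natCast]
  exact List.take_left ..

lemma pvExB_append (K : List (Option String)) (k : Option String) :
    pvExemplarsB (K ++ [k]) =
      pvExemplarsB K ++ (if k = none ∨ k ∉ K then [((K.length : Int))] else []) := by
  unfold pvExemplarsB
  rw [pvEnumAppend, List.filterMap_append]
  congr 1
  · apply List.filterMap_congr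
    intro p hp
    rw [pvSliceExtend K k p hp]
  · simp only [List.filterMap_cons, List.filterMap_nil, pvSliceFull]
    split_ifs <;> rfl

lemma pvIdx_append (K : List (Option String)) (k : Option String) (k0 : String) :
    pvIndicesOfB (K ++ [k]) k0 =
      pvIndicesOfB K k0 ++ (if k = some k0 then [((K.length : Int))] else []) := by
  unfold pvIndicesOfB
  rw [pvEnumAppend, List.filterMap_append]
  congr 1
  simp only [List.filterMap_cons, List.filterMap_nil]
  split_ifs <;> rfl

lemma pvSingles_append (K : List (Option String)) (k : Option String) :
    pvSinglesB (K ++ [k]) = pvSinglesB K ++ (if k = none then [((K.length : Int))] else []) := by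
  unfold pvSinglesB
  rw [pvEnumAppend, List.filterMap_append]
  congr 1
  simp only [List.filterMap_cons, List.filterMap_nil]
  split_ifs <;> rfl

lemma pvFirstKeys_append (K : List (Option String)) (k : Option String) :
    pvFirstKeys (K ++ [k]) =
      pvFirstKeys K ++ (match k with
        | none => []
        | some k0 => if some k0 ∈ K then [] else [k0]) := by
  unfold pvFirstKeys
  rw [pvEnumAppend, List.filterMap_append]
  congr 1
  · apply List.filterMap_congr
    intro p hp
    rw [pvSliceExtend K k p hp]
  · simp only [List.filterMap_cons, List.filterMap_nil, pvSliceFull]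
    cases k with
    | none => rfl
    | some k0 => by_cases h : some k0 ∈ K <;> simp [h]

lemma pvByKeyB_eq (K : List (Option String)) :
    pvByKeyB K = (pvFirstKeys K).map (fun k0 => (k0, pvIndicesOfB K k0)) := by
  unfold pvByKeyB pvFirstKeys
  rw [List.map_filterMap]
  apply List.filterMap_congr
  intro p _
  rcases p with ⟨i, k⟩
  cases k with
  | none => rfl
  | some k0 => by_cases h : some k0 ∈ PySem.List.slice K none (some i) <;> simp [h]

lemma pvMemFirstKeys (K : List (Option String)) (k0 : String) :
    k0 ∈ pvFirstKeys K ↔ some k0 ∈ K := by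
  induction K using List.reverseRecOn with
  | nil => simp [pvFirstKeys, PySem.List.enumerate_nil]
  | append_singleton K k ih =>
    rw [pvFirstKeys_append]
    cases k with
    | none => simp [ih]
    | some k1 =>
      by_cases h : some k1 ∈ K
      · simp only [h, if_pos]
        rw [List.append_nil, ih]
        constructor
        · intro hm; exact List.mem_append.mpr (Or.inl hm)
        · intro hm
          rcases List.mem_append.mp hm with hm | hm
          · exact hm
          · simp at hm; rw [hm]; exact h
      · simp only [h, if_neg, not_false_iff]
        rw [List.mem_append, ih, List.mem_append]
        simp
  
lemma pvNodupFirstKeys (K : List (Option String)) : (pvFirstKeys K).Nodup := by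
  induction K using List.reverseRecOn with
  | nil => simp [pvFirstKeys, PySem.List.enumerate_nil]
  | append_singleton K k ih =>
    rw [pvFirstKeys_append]
    cases k with
    | none => simpa using ih
    | some k1 =>
      by_cases h : some k1 ∈ K
      · simpa [h] using ih
      · simp only [h, if_neg, not_false_iff]
        rw [List.nodup_append]
        refine ⟨ih, List.nodup_singleton _, ?_⟩
        intro a ha b hb
        simp at hb; subst hb
        intro hab; subst hab
        exact h ((pvMemFirstKeys K a).mp ha)

lemma pvIdxLt (K : List (Option String)) (k0 : String) (x : Int)
    (hx : x ∈ pvIndicesOfB K k0) : x < (K.length : Int) := by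
  unfold pvIndicesOfB at hx
  rcases List.mem_filterMap.mp hx with ⟨q, hq, hqe⟩
  rcases (PySem.List.mem_enumerate_iff _ _ _).mp hq with ⟨j, hj, hje⟩
  by_cases h : q.2 = some k0
  · simp only [h, if_pos] at hqe
    have hx1 : q.1 = x := by simpa using hqe
    rw [← hx1, hje]
    simp
    omega
  · simp [h] at hqe

lemma pvIdxNeNil (K : List (Option String)) (k0 : String) (h : some k0 ∈ K) :
    pvIndicesOfB K k0 ≠ [] := by
  rcases List.mem_iff_getElem.mp h with ⟨j, hj, hje⟩
  have hmem : ((j : Int)) ∈ pvIndicesOfB K k0 := by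
    apply List.mem_filterMap.mpr
    refine ⟨((0 : Int) + (j : Nat), K[j]), ?_, ?_⟩
    · exact (PySem.List.mem_enumerate_iff _ _ _).mpr ⟨j, hj, rfl⟩
    · simp [hje]
  exact List.ne_nil_of_mem hmem

lemma pvIdxNilOfFresh (K : List (Option String)) (k0 : String) (h : some k0 ∉ K) :
    pvIndicesOfB K k0 = [] := by
  unfold pvIndicesOfB
  rw [List.filterMap_eq_nil_iff]
  intro q hq
  by_cases h2 : q.2 = some k0
  · exfalso
    apply h
    have : q.2 ∈ (PySem.List.enumerate K 0).map (·.2) := List.mem_map_of_mem hq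
    rw [PySem.List.map_snd_enumerate] at this
    rwa [h2] at this
  · simp [h2]

lemma pvPairwiseFilterIdx (c : Int × Option String → Prop) [DecidablePred c] :
    ∀ (L : List (Int × Option String)), L.Pairwise (fun p q => p.1 < q.1) →
      (L.filterMap (fun p => if c p then some p.1 else none)).Pairwise (· < ·) := by
  intro L
  induction L with
  | nil => intro _; simp
  | cons hd tl ih =>
    intro h
    rw [List.pairwise_cons] at h
    rw [List.filterMap_cons]
    by_cases hc : c hd
    · simp only [hc, if_pos]
      rw [List.pairwise_cons]
      refine ⟨?_, ih h.2⟩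
      intro x hx
      rcases List.mem_filterMap.mp hx with ⟨q, hq, hqe⟩
      by_cases hcq : c q
      · have hx1 : q.1 = x := by simpa [hcq] using hqe
        rw [← hx1]; exact h.1 q hq
      · simp [hcq] at hqe
    · simp only [hc, if_neg, not_false_iff]
      exact ih h.2

lemma pvExBPairwise (K : List (Option String)) : (pvExemplarsB K).Pairwise (· < ·) :=
  pvPairwiseFilterIdx _ _ (PySem.List.pairwise_lt_enumerate K 0)

-- the loop of A, applied to a list with one more element at the end
lemma pvLoopA_append (l : List (List (String × String))) (tx : List (String × String)) :
    ∀ (i : Int) (d : PySem.Dict String (List Int)) (s : List Int),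
      pvLoopA (l ++ [tx]) i d s =
        (match pvNormKey tx with
          | none => ((pvLoopA l i d s).1, (pvLoopA l i d s).2 ++ [i + (l.length : Int)])
          | some k => ((pvLoopA l i d s).1.modify k [] (fun v => v ++ [i + (l.length : Int)]),
                       (pvLoopA l i d s).2)) := by
  induction l with
  | nil =>
    intro i d s
    cases hk : pvNormKey tx <;> simp_all [pvLoopA]
  | cons tx0 rest ih =>
    intro i d s
    have harith : i + 1 + (rest.length : Int) = i + ((rest.length + 1 : Nat) : Int) := by
      push_cast; ring
    cases hk0 : pvNormKey tx0 <;>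
      simp only [List.cons_append, pvLoopA, hk0, ih, List.length_cons, harith]

-- the main characterization: the final state of A's loop, in B's closed forms
lemma pvMainChar (seq : List (List (String × String))) :
    (pvLoopA seq 0 PySem.Dict.empty []).1.items
        = (pvFirstKeys (seq.map pvNormKey)).map
            (fun k0 => (k0, pvIndicesOfB (seq.map pvNormKey) k0)) ∧
    (pvLoopA seq 0 PySem.Dict.empty []).2 = pvSinglesB (seq.map pvNormKey) ∧
    (pvMinsOf (pvLoopA seq 0 PySem.Dict.empty []).1.items
        ++ (pvLoopA seq 0 PySem.Dict.empty []).2).Perm (pvExemplarsB (seq.map pvNormKey)) := by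
  induction seq using List.reverseRecOn with
  | nil =>
    refine ⟨rfl, rfl, ?_⟩
    simp [pvMinsOf, pvLoopA, PySem.Dict.empty, pvExemplarsB,
      PySem.List.enumerate_nil]
  | append_singleton l tx ih =>
    obtain ⟨hitems, hs, hperm⟩ := ih
    set K := l.map pvNormKey with hK
    have hKlen : K.length = l.length := by simp [hK]
    have hKext : (l ++ [tx]).map pvNormKey = K ++ [pvNormKey tx] := by simp [hK]
    have hkeys : (pvLoopA l 0 PySem.Dict.empty []).1.keys = pvFirstKeys K := by
      show (pvLoopA l 0 PySem.Dict.empty []).1.items.map (·.1) = pvFirstKeys K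
      rw [hitems, List.map_map]
      simp [Function.comp_def]
    have hnd : (pvLoopA l 0 PySem.Dict.empty []).1.keys.Nodup := by
      rw [hkeys]; exact pvNodupFirstKeys K
    have hloop := pvLoopA_append l tx 0 (PySem.Dict.empty) []
    rw [hKext]
    cases hk : pvNormKey tx with
    | none =>
      rw [hk] at hloop
      simp only [hloop, zero_add]
      have hbk : (pvFirstKeys (K ++ [none])).map
            (fun k0 => (k0, pvIndicesOfB (K ++ [none]) k0))
          = (pvFirstKeys K).map (fun k0 => (k0, pvIndicesOfB K k0)) := by
        rw [pvFirstKeys_append]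
        simp only [List.append_nil]
        apply List.map_congr_left
        intro k0 _
        rw [pvIdx_append]
        simp
      refine ⟨by rw [hbk]; exact hitems, ?_, ?_⟩
      · rw [pvSingles_append, hKlen]
        rw [hs]
        simp
      · rw [pvExB_append, hKlen]
        simp only [true_or, if_pos]
        have h1 : (pvMinsOf (pvLoopA l 0 PySem.Dict.empty []).1.items
            ++ ((pvLoopA l 0 PySem.Dict.empty []).2 ++ [(l.length : Int)])).Perm
            ((pvMinsOf (pvLoopA l 0 PySem.Dict.empty []).1.items
              ++ (pvLoopA l 0 PySem.Dict.empty []).2) ++ [(l.length : Int)]) := by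
          rw [List.append_assoc]
        exact h1.trans (hperm.append (List.Perm.refl _))
    | some k0 =>
      rw [hk] at hloop
      simp only [hloop, zero_add]
      by_cases hmem : some k0 ∈ K
      · -- existing key: the entry's index list grows, everything else unchanged
        have hkin : k0 ∈ (pvLoopA l 0 PySem.Dict.empty []).1.keys := by
          rw [hkeys]; exact (pvMemFirstKeys K k0).mpr hmem
        have hcont : (pvLoopA l 0 PySem.Dict.empty []).1.contains k0 = true :=
          (PySem.Dict.contains_iff_mem_keys _ _).mpr hkin
        have hpair : (k0, pvIndicesOfB K k0) ∈ (pvLoopA l 0 PySem.Dict.empty []).1.items := by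
          rw [hitems]
          exact List.mem_map_of_mem ((pvMemFirstKeys K k0).mpr hmem)
        have hget : (pvLoopA l 0 PySem.Dict.empty []).1.get? k0 = some (pvIndicesOfB K k0) :=
          PySem.Dict.get?_of_mem_items _ hpair hnd
        have hgetD : (pvLoopA l 0 PySem.Dict.empty []).1.getD k0 [] = pvIndicesOfB K k0 :=
          PySem.Dict.getD_of_get?_eq_some _ [] hget
        have hmod : (pvLoopA l 0 PySem.Dict.empty []).1.modify k0 []
              (fun v => v ++ [(l.length : Int)])
            = (pvLoopA l 0 PySem.Dict.empty []).1.insert k0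
              (pvIndicesOfB K k0 ++ [(l.length : Int)]) := by
          show (pvLoopA l 0 PySem.Dict.empty []).1.insert k0
              ((pvLoopA l 0 PySem.Dict.empty []).1.getD k0 [] ++ [(l.length : Int)]) = _
          rw [hgetD]
        have hitems' : ((pvLoopA l 0 PySem.Dict.empty []).1.modify k0 []
              (fun v => v ++ [(l.length : Int)])).items
            = (pvFirstKeys K).map
                (fun k1 => (k1, pvIndicesOfB (K ++ [some k0]) k1)) := by
          rw [hmod, PySem.Dict.items_insert_of_contains _ _ hcont, hitems, List.map_map]
          apply List.map_congr_left
          intro k1 _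
          simp only [Function.comp_apply]
          by_cases h1 : k1 = k0
          · subst h1
            simp only [BEq.rfl, if_pos]
            rw [pvIdx_append]
            simp [hKlen]
          · have hne : (k1 == k0) = false := by simp [h1]
            rw [hne]
            simp only [Bool.false_eq_true, if_false]
            rw [pvIdx_append]
            simp [Ne.symm h1]
        have hfk : pvFirstKeys (K ++ [some k0]) = pvFirstKeys K := by
          rw [pvFirstKeys_append]; simp [hmem]
        refine ⟨by rw [hitems', hfk], ?_, ?_⟩
        · rw [pvSingles_append]
          simp only [reduceCtorEq, if_neg, not_false_iff]
          rw [List.append_nil, hs]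
        · have hmins : pvMinsOf ((pvLoopA l 0 PySem.Dict.empty []).1.modify k0 []
                (fun v => v ++ [(l.length : Int)])).items
              = pvMinsOf (pvLoopA l 0 PySem.Dict.empty []).1.items := by
            rw [hitems', hitems]
            unfold pvMinsOf
            rw [List.map_map, List.map_map]
            apply List.map_congr_left
            intro k1 _
            simp only [Function.comp_apply]
            by_cases h1 : k1 = k0
            · subst h1
              rw [pvIdx_append]
              simp only [if_pos]
              apply pvMinAppendBig
              · exact pvIdxNeNil K k1 hmem
              · intro x hx
                exact pvIdxLt K k1 x hx
            · rw [pvIdx_append]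
              simp [Ne.symm h1]
          rw [hmins, pvExB_append]
          have hcond : ¬ ((some k0 : Option String) = none ∨ (some k0 : Option String) ∉ K) := by
            simp [hmem]
          rw [if_neg hcond, List.append_nil]
          exact hperm
      · -- fresh key: a new entry is appended; its only index is the new one
        have hkout : k0 ∉ (pvLoopA l 0 PySem.Dict.empty []).1.keys := by
          rw [hkeys]
          intro hcontra
          exact hmem ((pvMemFirstKeys K k0).mp hcontra)
        have hcont : (pvLoopA l 0 PySem.Dict.empty []).1.contains k0 = false := by
          by_contra h
          have : (pvLoopA l 0 PySem.Dict.empty []).1.contains k0 = true := by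
            cases hcc : (pvLoopA l 0 PySem.Dict.empty []).1.contains k0
            · exact absurd hcc h
            · rfl
          exact hkout ((PySem.Dict.contains_iff_mem_keys _ _).mp this)
        have hgetD : (pvLoopA l 0 PySem.Dict.empty []).1.getD k0 [] = [] :=
          PySem.Dict.getD_of_not_contains _ [] hcont
        have hmod : (pvLoopA l 0 PySem.Dict.empty []).1.modify k0 []
              (fun v => v ++ [(l.length : Int)])
            = (pvLoopA l 0 PySem.Dict.empty []).1.insert k0 [(l.length : Int)] := by
          show (pvLoopA l 0 PySem.Dict.empty []).1.insert k0
              ((pvLoopA l 0 PySem.Dict.empty []).1.getD k0 [] ++ [(l.length : Int)]) = _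
          rw [hgetD]
          rfl
        have hfk : pvFirstKeys (K ++ [some k0]) = pvFirstKeys K ++ [k0] := by
          rw [pvFirstKeys_append]; simp [hmem]
        have hitems' : ((pvLoopA l 0 PySem.Dict.empty []).1.modify k0 []
              (fun v => v ++ [(l.length : Int)])).items
            = (pvFirstKeys (K ++ [some k0])).map
                (fun k1 => (k1, pvIndicesOfB (K ++ [some k0]) k1)) := by
          rw [hmod, PySem.Dict.items_insert_of_not_contains _ _ hcont, hitems, hfk,
            List.map_append]
          congr 1
          · apply List.map_congr_left
            intro k1 hk1
            have hne : k1 ≠ k0 := by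
              intro h; subst h
              exact hmem ((pvMemFirstKeys K k1).mp hk1)
            rw [pvIdx_append]
            simp [Ne.symm hne]
          · simp only [List.map_cons, List.map_nil]
            rw [pvIdx_append]
            simp [pvIdxNilOfFresh K k0 hmem, hKlen]
        refine ⟨hitems', ?_, ?_⟩
        · rw [pvSingles_append]
          simp only [reduceCtorEq, if_neg, not_false_iff]
          rw [List.append_nil, hs]
        · have hmins : pvMinsOf ((pvLoopA l 0 PySem.Dict.empty []).1.modify k0 []
                (fun v => v ++ [(l.length : Int)])).items
              = pvMinsOf (pvLoopA l 0 PySem.Dict.empty []).1.items ++ [(l.length : Int)] := by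
            rw [hitems', hfk, hitems]
            unfold pvMinsOf
            simp only [List.map_append, List.map_map]
            congr 1
            · apply List.map_congr_left
              intro k1 hk1
              have hne : k1 ≠ k0 := by
                intro h; subst h
                exact hmem ((pvMemFirstKeys K k1).mp hk1)
              simp only [Function.comp_apply]
              rw [pvIdx_append]
              simp [Ne.symm hne]
            · simp only [List.map_cons, List.map_nil, Function.comp_apply]
              rw [pvIdx_append]
              simp [pvIdxNilOfFresh K k0 hmem, PySem.List.min?_id_cons, hKlen]
          rw [hmins, pvExB_append]
          have hcond : ((some k0 : Option String) = none ∨ (some k0 : Option String) ∉ K) := by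
            simp [hmem]
          rw [if_pos hcond, hKlen]
          have h1 : ((pvMinsOf (pvLoopA l 0 PySem.Dict.empty []).1.items ++ [(l.length : Int)])
              ++ (pvLoopA l 0 PySem.Dict.empty []).2).Perm
              ((pvMinsOf (pvLoopA l 0 PySem.Dict.empty []).1.items
                ++ (pvLoopA l 0 PySem.Dict.empty []).2) ++ [(l.length : Int)]) := by
            rw [List.append_assoc, List.append_assoc]
            exact List.Perm.append_left _ List.perm_append_comm
          exact h1.trans (hperm.append (List.Perm.refl _))

-- ===== VERDICT (by name: the statement is the Claim_ definition above) =====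
theorem group_by_normalized_merchant_py_spec : Claim_equal_group_by_normalized_merchant_py := by
  intro seq _
  unfold Spec_group_by_normalized_merchant_py group_by_normalized_merchant_py
    group_by_normalized_merchant_py_alt
  obtain ⟨hitems, hs, hperm⟩ := pvMainChar seq
  have hvals : (pvLoopA seq 0 PySem.Dict.empty []).1.values.foldl
        (fun acc idxs => acc ++ [(PySem.List.min? idxs (fun x => x)).getD 0]) []
      = pvMinsOf (pvLoopA seq 0 PySem.Dict.empty []).1.items := by
    rw [pvFoldlAppendMap]
    show [] ++ ((pvLoopA seq 0 PySem.Dict.empty []).1.items.map (·.2)).map _ = _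
    rw [List.nil_append, List.map_map]
    rfl
  simp only [hvals]
  rw [PySem.List.sorted_eq_of_perm_of_pairwise_lt _ _ _ hperm.symm
    (pvExBPairwise (seq.map pvNormKey))]
  rw [hitems, hs, ← pvByKeyB_eq]
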